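-- pv_equiv track=rewrite | github.com/DanieIoZ/Studies_git | python/Reversi/reversi/player.py | get_smallest_moves
-- ===== SOURCE A (Python) =====
-- def get_smallest_moves(moves):
--     best_moves = []
--     if (len(moves) == 0):
--         return None
--
--     max_cv = max([d[2] for d in moves])
--     for i in range(len(moves)):
--         if (moves[i][2] == max_cv):
--             best_moves.append(moves[i])
--
--     min_mv = min([d[1] for d in best_moves])
--     for i in range(len(best_moves), 0):
--         if (best_moves[i][1] != min_mv):
--             best_moves.remove(moves[i])
--     return best_moves
-- ===== SOURCE B (Python) =====
-- def get_smallest_moves(moves):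
--     # Single pass: track the running maximum of index-2 values and the
--     # moves attaining it; reset the bucket when a larger value appears.
--     if not moves:
--         return None
--     best = moves[0][2]
--     acc = [moves[0]]
--     for d in moves[1:]:
--         if d[2] > best:
--             best = d[2]
--             acc = [d]
--         elif d[2] == best:
--             acc.append(d)
--     return acc
-- ===== Notes on version B (the rewrite author's own statement) =====
-- stated objective: simpler
-- what changed: Replaces A's two-pass max-then-index-filter (plus a dead min_mv loop that never runs) by a single running-max pass that keeps the bucket of moves attaining the current maximum.
import Mathlib
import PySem

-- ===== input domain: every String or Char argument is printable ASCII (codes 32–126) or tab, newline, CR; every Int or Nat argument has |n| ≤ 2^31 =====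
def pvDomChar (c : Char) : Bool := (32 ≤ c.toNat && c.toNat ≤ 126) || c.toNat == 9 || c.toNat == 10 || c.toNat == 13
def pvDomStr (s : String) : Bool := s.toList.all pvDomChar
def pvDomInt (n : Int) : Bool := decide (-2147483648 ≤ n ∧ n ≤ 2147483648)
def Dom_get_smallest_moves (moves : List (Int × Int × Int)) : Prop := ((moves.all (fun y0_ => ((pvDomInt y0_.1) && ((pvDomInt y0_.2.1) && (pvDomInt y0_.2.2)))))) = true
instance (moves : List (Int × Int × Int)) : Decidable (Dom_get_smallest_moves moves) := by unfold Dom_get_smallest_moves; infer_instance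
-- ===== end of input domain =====

-- B replaces A's two passes (list max, then an index-filter loop, plus a dead min_mv loop)
-- by a single running-max pass — objective: simpler, same O(n) cost.

-- ===== PORT A =====
def get_smallest_moves (moves : List (Int × Int × Int)) : Option (List (Int × Int × Int)) :=
  if moves.length == 0 then none
  else
    match PySem.List.max? (moves.map (fun d => d.2.2)) (fun y => y) with
    | none => none  -- max() on an empty list raises; unreachable (moves is nonempty)
    | some max_cv =>
      let best_moves := (PySem.List.pyRange 0 (moves.length : Int) 1).foldl
        (fun acc i => if (PySem.List.pyGetD moves i (0,0,0)).2.2 == max_cv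
                      then acc ++ [PySem.List.pyGetD moves i (0,0,0)] else acc) []
      match PySem.List.min? (best_moves.map (fun d => d.2.1)) (fun y => y) with
      | none => none  -- min() on an empty list raises; unreachable (best_moves is nonempty)
      | some min_mv =>
        -- for i in range(len(best_moves), 0): body raises only via list.remove (ValueError);
        -- the range is empty, so the fold is over []
        let best_moves2 := (PySem.List.pyRange (best_moves.length : Int) 0 1).foldl
          (fun st i => st.bind (fun bm =>
            if (PySem.List.pyGetD bm i (0,0,0)).2.1 != min_mv
            then PySem.List.remove? bm (PySem.List.pyGetD moves i (0,0,0))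
            else some bm)) (some best_moves)
        best_moves2

-- ===== PORT B =====
def get_smallest_moves_alt (moves : List (Int × Int × Int)) : Option (List (Int × Int × Int)) :=
  match moves with
  | [] => none
  | m0 :: rest =>
    some ((rest.foldl
      (fun (st : Int × List (Int × Int × Int)) d =>
        if d.2.2 > st.1 then (d.2.2, [d])
        else if d.2.2 == st.1 then (st.1, st.2 ++ [d])
        else st)
      (m0.2.2, [m0])).2)

-- ===== PRECONDITION & SPEC =====
def Spec_get_smallest_moves (moves : List (Int × Int × Int)) (out : Option (List (Int × Int × Int))) : Prop := out = get_smallest_moves_alt moves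
instance (moves : List (Int × Int × Int)) (out : Option (List (Int × Int × Int))) : Decidable (Spec_get_smallest_moves moves out) := by unfold Spec_get_smallest_moves; infer_instance

-- ===== CLAIM (what is proved, stated in full; the proofs are below) =====
def Claim_equal_get_smallest_moves : Prop := ∀ (moves : List (Int × Int × Int)), Dom_get_smallest_moves moves → Spec_get_smallest_moves moves (get_smallest_moves moves)

-- ===== LEMMAS AND PROOFS =====

-- the running-max value of index-2 entries, seeded with b
def pvMaxKey (b : Int) (l : List (Int × Int × Int)) : Int :=
  (l.map (fun d => d.2.2)).foldl max b

lemma pvMaxKey_cons (b : Int) (d : Int × Int × Int) (t : List (Int × Int × Int)) :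
    pvMaxKey b (d :: t) = pvMaxKey (max b d.2.2) t := rfl

lemma le_pvMaxKey (b : Int) (l : List (Int × Int × Int)) : b ≤ pvMaxKey b l := by
  induction l generalizing b with
  | nil => simp [pvMaxKey]
  | cons d t ih =>
    rw [pvMaxKey_cons]
    exact le_trans (le_max_left _ _) (ih _)

lemma filter_cons_key (d : Int × Int × Int) (t : List (Int × Int × Int)) (M : Int) :
    (d :: t).filter (fun x => x.2.2 == M)
      = (if d.2.2 = M then [d] else []) ++ t.filter (fun x => x.2.2 == M) := by
  by_cases h : d.2.2 = M <;> simp [h]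

-- B's fold computes the running maximum together with the bucket of moves attaining it
lemma foldB (rest : List (Int × Int × Int)) :
    ∀ (b : Int) (acc : List (Int × Int × Int)),
      rest.foldl
        (fun (st : Int × List (Int × Int × Int)) d =>
          if d.2.2 > st.1 then (d.2.2, [d])
          else if d.2.2 == st.1 then (st.1, st.2 ++ [d])
          else st) (b, acc)
      = (pvMaxKey b rest,
         (if b = pvMaxKey b rest then acc else []) ++
           rest.filter (fun d => d.2.2 == pvMaxKey b rest)) := by
  induction rest with
  | nil => intro b acc; simp [pvMaxKey]
  | cons d t ih =>
    intro b acc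
    rw [List.foldl_cons, pvMaxKey_cons]
    by_cases hgt : d.2.2 > b
    · rw [if_pos hgt, max_eq_right (le_of_lt hgt), ih d.2.2 [d], filter_cons_key]
      have hle := le_pvMaxKey d.2.2 t
      have hbne : b ≠ pvMaxKey d.2.2 t := by omega
      rw [if_neg hbne]
      simp
    · rw [if_neg hgt, max_eq_left (by omega)]
      by_cases heq : d.2.2 = b
      · rw [if_pos (show (d.2.2 == b) = true by simp [heq]), ih b (acc ++ [d]), filter_cons_key]
        by_cases h : b = pvMaxKey b t
        · rw [if_pos h, if_pos h, if_pos (show d.2.2 = pvMaxKey b t by omega)]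
          simp
        · rw [if_neg h, if_neg h, if_neg (show ¬ d.2.2 = pvMaxKey b t by omega)]
          simp
      · rw [if_neg (show ¬ (d.2.2 == b) = true by simp [heq]), ih b acc, filter_cons_key]
        have hle := le_pvMaxKey b t
        rw [if_neg (show ¬ d.2.2 = pvMaxKey b t by omega)]
        simp

lemma B_eq (m0 : Int × Int × Int) (rest : List (Int × Int × Int)) :
    get_smallest_moves_alt (m0 :: rest)
      = some ((m0 :: rest).filter (fun d => d.2.2 == pvMaxKey m0.2.2 rest)) := by
  simp only [get_smallest_moves_alt]
  rw [foldB rest m0.2.2 [m0], filter_cons_key]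

lemma A_eq (m0 : Int × Int × Int) (rest : List (Int × Int × Int)) :
    get_smallest_moves (m0 :: rest)
      = some ((m0 :: rest).filter (fun d => d.2.2 == pvMaxKey m0.2.2 rest)) := by
  have hmaxq : PySem.List.max? ((m0 :: rest).map (fun d => d.2.2)) (fun y => y)
      = some (pvMaxKey m0.2.2 rest) := by
    rw [List.map_cons, PySem.List.max?_id_cons]; rfl
  have hloop3 : List.foldl
      (fun acc i =>
        if (PySem.List.pyGetD (m0 :: rest) i ((0:Int), (0:Int), (0:Int))).2.2 = pvMaxKey m0.2.2 rest then
          acc ++ [PySem.List.pyGetD (m0 :: rest) i (0, 0, 0)]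
        else acc)
      [] (PySem.List.pyRange 0 ((rest.length + 1 : Nat) : Int) 1)
      = (m0 :: rest).filter (fun d => d.2.2 == pvMaxKey m0.2.2 rest) := by
    rw [show ((rest.length + 1 : Nat) : Int) = (((m0 :: rest).length : Nat) : Int) by simp]
    rw [PySem.List.foldl_pyRange_zero_pyGetD' (m0 :: rest) (0, 0, 0)
      (fun acc (x : Int × Int × Int) => if x.2.2 = pvMaxKey m0.2.2 rest then acc ++ [x] else acc) []]
    rw [PySem.List.foldl_append_ite_eq_filter]
    have hpred : (fun x : Int × Int × Int => decide (x.2.2 = pvMaxKey m0.2.2 rest))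
        = (fun x : Int × Int × Int => x.2.2 == pvMaxKey m0.2.2 rest) := by
      funext x; by_cases h : x.2.2 = pvMaxKey m0.2.2 rest <;> simp [h]
    rw [List.nil_append, hpred]
  -- the filtered list is nonempty, so min() does not raise
  have hmem : pvMaxKey m0.2.2 rest ∈ (m0 :: rest).map (fun d => d.2.2) :=
    PySem.List.max?_mem hmaxq
  obtain ⟨d, hd, hdk⟩ := List.mem_map.1 hmem
  have hdfil : d ∈ (m0 :: rest).filter (fun d => d.2.2 == pvMaxKey m0.2.2 rest) :=
    List.mem_filter.2 ⟨hd, by simp [hdk]⟩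
  have hne : ((m0 :: rest).filter (fun d => d.2.2 == pvMaxKey m0.2.2 rest)).map (fun d => d.2.1) ≠ [] := by
    simp only [ne_eq, List.map_eq_nil_iff]
    exact List.ne_nil_of_mem hdfil
  have hmin : PySem.List.min? (((m0 :: rest).filter (fun d => d.2.2 == pvMaxKey m0.2.2 rest)).map (fun d => d.2.1)) (fun y => y) ≠ none := by
    intro h
    exact hne ((PySem.List.min?_eq_none_iff _ _).1 h)
  obtain ⟨w, hw⟩ := Option.ne_none_iff_exists'.1 hmin
  simp only [get_smallest_moves, List.length_cons, hmaxq, beq_iff_eq, hloop3, hw]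
  simp [PySem.List.pyRange]

-- ===== VERDICT (by name: the statement is the Claim_ definition above) =====
theorem get_smallest_moves_spec : Claim_equal_get_smallest_moves := by
  intro moves _
  unfold Spec_get_smallest_moves
  cases moves with
  | nil => rfl
  | cons m0 rest => rw [A_eq, B_eq]
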